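-- pv_equiv track=rewrite | github.com/Basic-Nature/html_Parser_prototype | webapp/parser/Context_Integration/context_organizer.py | get_best_button
-- ===== SOURCE A (Python) =====
-- def get_best_button(organized_context, contest_title, keywords=None, class_hint=None):
--     buttons = organized_context["buttons"].get(contest_title, [])
--     if not buttons:
--         buttons = organized_context["buttons"].get("__unmatched__", [])
--     if keywords:
--         for btn in buttons:
--             if any(kw.lower() in btn.get("label", "").lower() for kw in keywords):
--                 if not class_hint or class_hint in btn.get("class", ""):
--                     return btn
--     if class_hint:
--         for btn in buttons:
--             if class_hint in btn.get("class", ""):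
--                 return btn
--     return buttons[0] if buttons else None
-- ===== SOURCE B (Python) =====
-- def get_best_button(organized_context, contest_title, keywords=None, class_hint=None):
--     table = organized_context["buttons"]
--     buttons = table.get(contest_title) or table.get("__unmatched__", [])
--
--     def rank(btn):
--         if keywords and any(kw.lower() in btn.get("label", "").lower() for kw in keywords) \
--                 and (not class_hint or class_hint in btn.get("class", "")):
--             return 0
--         if class_hint and class_hint in btn.get("class", ""):
--             return 1
--         return 2
--
--     return min(buttons, key=rank, default=None)
-- ===== Notes on version B (the rewrite author's own statement) =====
-- stated objective: alternative
-- what changed: Replaces A's two staged early-return scans by a ranking function assigning each button a tier (0 = keyword+class-hint match, 1 = class-hint match, 2 = other) and a single stable min-by-key over the button list.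
import Mathlib
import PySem

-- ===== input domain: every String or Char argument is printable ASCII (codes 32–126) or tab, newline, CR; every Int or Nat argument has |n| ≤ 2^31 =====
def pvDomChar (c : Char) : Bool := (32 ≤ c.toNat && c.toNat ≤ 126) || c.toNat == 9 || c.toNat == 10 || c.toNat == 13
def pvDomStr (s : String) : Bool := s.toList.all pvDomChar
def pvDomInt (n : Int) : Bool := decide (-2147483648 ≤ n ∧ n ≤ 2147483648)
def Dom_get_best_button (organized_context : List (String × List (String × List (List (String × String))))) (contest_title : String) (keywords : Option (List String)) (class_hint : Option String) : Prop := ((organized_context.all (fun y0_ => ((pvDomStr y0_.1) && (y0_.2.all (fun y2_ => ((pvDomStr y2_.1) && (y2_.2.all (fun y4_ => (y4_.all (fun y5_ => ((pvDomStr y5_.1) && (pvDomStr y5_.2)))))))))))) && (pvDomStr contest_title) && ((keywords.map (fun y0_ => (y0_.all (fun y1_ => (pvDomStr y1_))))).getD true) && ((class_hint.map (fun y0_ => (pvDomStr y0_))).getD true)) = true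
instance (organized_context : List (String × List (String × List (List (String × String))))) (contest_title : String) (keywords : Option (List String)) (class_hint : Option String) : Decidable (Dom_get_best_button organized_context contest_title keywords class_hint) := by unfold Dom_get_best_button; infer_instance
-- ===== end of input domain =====

-- B replaces A's two staged early-return scans by one ranking function (tier 0/1/2 per button)
-- and a single stable min-by-key; objective: alternative decomposition, same cost.

-- ===== PORT A =====
-- btn.get("label","").lower() and the 'kw.lower() in …' / 'class_hint in …' tests, via PySem.Dict / PySem.Str
def pvKwHit (keywords : List String) (btn : List (String × String)) : Bool :=
  keywords.any (fun kw =>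
    PySem.Str.isIn (PySem.Str.lower kw) (PySem.Str.lower ((PySem.Dict.mk btn).getD "label" "")))

def pvClassHit (ch : String) (btn : List (String × String)) : Bool :=
  PySem.Str.isIn ch ((PySem.Dict.mk btn).getD "class" "")

def get_best_button (organized_context : List (String × List (String × List (List (String × String))))) (contest_title : String) (keywords : Option (List String)) (class_hint : Option String) : Option (List (String × String)) :=
  match (PySem.Dict.mk organized_context).get? "buttons" with
  | none => none   -- Python raises KeyError here; excluded by Pre_
  | some bpairs =>
    let bdict := PySem.Dict.mk bpairs
    let buttons0 := bdict.getD contest_title []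
    let buttons := if buttons0 = [] then bdict.getD "__unmatched__" [] else buttons0
    let kwList := keywords.getD []
    let chS := class_hint.getD ""
    let chActive : Bool := !(chS == "")
    let tier1 :=
      if !kwList.isEmpty then
        buttons.find? (fun btn => pvKwHit kwList btn && (!chActive || pvClassHit chS btn))
      else none
    match tier1 with
    | some b => some b
    | none =>
      match (if chActive then buttons.find? (fun btn => pvClassHit chS btn) else none) with
      | some b => some b
      | none => buttons.head?

-- ===== PORT B =====
-- Source B's inner 'rank': tier 0 for a keyword match that also satisfies the class hint,
-- tier 1 for a plain class-hint match, tier 2 otherwise.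
def pvRank (keywords : Option (List String)) (class_hint : Option String) (btn : List (String × String)) : Int :=
  let d := PySem.Dict.mk btn
  if !(keywords.getD []).isEmpty
      && (keywords.getD []).any (fun kw =>
            PySem.Str.isIn (PySem.Str.lower kw) (PySem.Str.lower (d.getD "label" "")))
      && ((class_hint.getD "" == "") || PySem.Str.isIn (class_hint.getD "") (d.getD "class" ""))
  then 0
  else if !(class_hint.getD "" == "") && PySem.Str.isIn (class_hint.getD "") (d.getD "class" "")
  then 1
  else 2

-- min(buttons, key=rank, default=None): PySem.List.min? is Python's stable min-by-key.
def get_best_button_alt (organized_context : List (String × List (String × List (List (String × String))))) (contest_title : String) (keywords : Option (List String)) (class_hint : Option String) : Option (List (String × String)) :=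
  match (PySem.Dict.mk organized_context).get? "buttons" with
  | none => none   -- Python raises KeyError here; excluded by Pre_
  | some bpairs =>
    let table := PySem.Dict.mk bpairs
    let buttons := match table.get? contest_title with
      | some v => if v.isEmpty then table.getD "__unmatched__" [] else v
      | none => table.getD "__unmatched__" []
    PySem.List.min? buttons (pvRank keywords class_hint)

-- ===== PRECONDITION & SPEC =====
-- Pre_ excludes exactly the inputs where Python A raises KeyError: no "buttons" key in organized_context.
def Pre_get_best_button (organized_context : List (String × List (String × List (List (String × String))))) (contest_title : String) (keywords : Option (List String)) (class_hint : Option String) : Prop :=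
  (PySem.Dict.mk organized_context).contains "buttons" = true
instance (organized_context : List (String × List (String × List (List (String × String))))) (contest_title : String) (keywords : Option (List String)) (class_hint : Option String) : Decidable (Pre_get_best_button organized_context contest_title keywords class_hint) := by unfold Pre_get_best_button; infer_instance

def pvWitness_get_best_button : (List (String × List (String × List (List (String × String))))) × String × Option (List String) × Option String :=
  ([("buttons", [("t", [[("label", "Vote")]])])], "t", some ["vote"], none)

def Spec_get_best_button (organized_context : List (String × List (String × List (List (String × String))))) (contest_title : String) (keywords : Option (List String)) (class_hint : Option String) (out : Option (List (String × String))) : Prop := out = get_best_button_alt organized_context contest_title keywords class_hint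
instance (organized_context : List (String × List (String × List (List (String × String))))) (contest_title : String) (keywords : Option (List String)) (class_hint : Option String) (out : Option (List (String × String))) : Decidable (Spec_get_best_button organized_context contest_title keywords class_hint out) := by unfold Spec_get_best_button; infer_instance

-- ===== CLAIM (what is proved, stated in full; the proofs are below) =====
def Claim_equal_get_best_button : Prop := ∀ (organized_context : List (String × List (String × List (List (String × String))))) (contest_title : String) (keywords : Option (List String)) (class_hint : Option String), Dom_get_best_button organized_context contest_title keywords class_hint → Pre_get_best_button organized_context contest_title keywords class_hint → Spec_get_best_button organized_context contest_title keywords class_hint (get_best_button organized_context contest_title keywords class_hint)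

-- ===== LEMMAS AND PROOFS =====

-- The fold of min-by-key with an accumulator, for a rank taking values in {0,1,2}.
theorem pv_min_fold {α : Type} (R : α → Int) (hR : ∀ x, R x = 0 ∨ R x = 1 ∨ R x = 2) :
    ∀ (t : List α) (m : α),
      t.foldl (fun acc x =>
          match acc with
          | none => some x
          | some m => if R x < R m then some x else some m) (some m)
      = (if R m = 0 then some m
         else match t.find? (fun x => R x == 0) with
           | some b => some b
           | none =>
             if R m = 1 then some m
             else match t.find? (fun x => R x == 1) with
               | some b => some b
               | none => some m) := by
  intro t
  induction t with
  | nil => intro m; rcases hR m with h | h | h <;> simp [h]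
  | cons b t ih =>
    intro m
    simp only [List.foldl_cons, List.find?_cons]
    rcases hR b with hb | hb | hb <;> rcases hR m with hm | hm | hm <;>
      simp [hb, hm, ih]

-- min?-by-rank is: first tier-0 element, else first tier-1 element, else the head.
theorem pv_min_chain {α : Type} (R : α → Int) (hR : ∀ x, R x = 0 ∨ R x = 1 ∨ R x = 2)
    (xs : List α) :
    PySem.List.min? xs R
      = ((xs.find? (fun x => R x == 0)).orElse (fun _ =>
          (xs.find? (fun x => R x == 1)).orElse (fun _ => xs.head?))) := by
  cases xs with
  | nil => simp [PySem.List.min?]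
  | cons b t =>
    unfold PySem.List.min?
    simp only [List.foldl_cons]
    refine Eq.trans (pv_min_fold R hR t b) ?_
    rcases hR b with hb | hb | hb <;>
      simp [hb] <;>
      (cases h0 : t.find? (fun x => R x == 0) <;> simp <;>
        cases h1 : t.find? (fun x => R x == 1) <;> simp)

-- find? respects pointwise-on-members equality of predicates.
theorem pv_find?_congr {α : Type} (p q : α → Bool) :
    ∀ (xs : List α), (∀ x ∈ xs, p x = q x) → xs.find? p = xs.find? q := by
  intro xs
  induction xs with
  | nil => intro _; rfl
  | cons b t ih =>
    intro h
    simp only [List.find?_cons, h b (by simp)]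
    cases q b
    · exact ih (fun x hx => h x (by simp [hx]))
    · rfl

theorem get_best_button_spec : Claim_equal_get_best_button := by
  intro oc ct kws ch _ hpre
  unfold Spec_get_best_button get_best_button get_best_button_alt
  unfold Pre_get_best_button at hpre
  rw [PySem.Dict.contains_eq_isSome_get?] at hpre
  cases hb : (PySem.Dict.mk oc).get? "buttons" with
  | none => simp [hb] at hpre
  | some bpairs =>
    simp only
    have hbtn : (if (PySem.Dict.mk bpairs).getD ct ([] : List (List (String × String))) = []
          then (PySem.Dict.mk bpairs).getD "__unmatched__" []
          else (PySem.Dict.mk bpairs).getD ct []) =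
        (match (PySem.Dict.mk bpairs).get? ct with
          | some v => if v.isEmpty then (PySem.Dict.mk bpairs).getD "__unmatched__" [] else v
          | none => (PySem.Dict.mk bpairs).getD "__unmatched__" []) := by
      rw [PySem.Dict.getD_eq_get?_getD]
      cases hv : (PySem.Dict.mk bpairs).get? ct with
      | none => simp
      | some v => cases v <;> simp
    rw [hbtn]
    set buttons := (match (PySem.Dict.mk bpairs).get? ct with
      | some v => if v.isEmpty then (PySem.Dict.mk bpairs).getD "__unmatched__" [] else v
      | none => (PySem.Dict.mk bpairs).getD "__unmatched__" []) with hdef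
    clear hdef hbtn hpre hb
    set R := pvRank kws ch with hRdef
    have hR : ∀ x, R x = 0 ∨ R x = 1 ∨ R x = 2 := by
      intro x; unfold pvRank at hRdef; rw [hRdef]; dsimp only; split_ifs <;> simp
    rw [pv_min_chain R hR buttons]
    have h0 : ∀ x, ((R x == 0) : Bool)
        = ((!(kws.getD []).isEmpty)
            && (pvKwHit (kws.getD []) x && (!!ch.getD "" == "" || pvClassHit (ch.getD "") x))) := by
      intro x
      rw [hRdef]
      simp only [pvRank, pvKwHit, pvClassHit]
      cases hke : (kws.getD []).isEmpty <;>
        cases ha : (kws.getD []).any (fun kw =>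
            PySem.Str.isIn (PySem.Str.lower kw) (PySem.Str.lower ((PySem.Dict.mk x).getD "label" ""))) <;>
        cases hcs : (ch.getD "" == "") <;>
        cases hq : PySem.Str.isIn (ch.getD "") ((PySem.Dict.mk x).getD "class" "") <;>
        simp [hcs, hq]
    have h1 : ∀ x, ((R x == 1) : Bool)
        = (!(R x == 0) && ((!ch.getD "" == "") && pvClassHit (ch.getD "") x)) := by
      intro x
      rw [hRdef]
      simp only [pvRank, pvKwHit, pvClassHit]
      cases hke : (kws.getD []).isEmpty <;>
        cases ha : (kws.getD []).any (fun kw =>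
            PySem.Str.isIn (PySem.Str.lower kw) (PySem.Str.lower ((PySem.Dict.mk x).getD "label" ""))) <;>
        cases hcs : (ch.getD "" == "") <;>
        cases hq : PySem.Str.isIn (ch.getD "") ((PySem.Dict.mk x).getD "class" "") <;>
        simp [hcs, hq]
    cases hf0 : buttons.find? (fun x => R x == 0) with
    | some b =>
      have hb0 : (R b == 0) = true := by
        have := List.find?_some (p := fun x => R x == 0) hf0
        simpa using this
      have hkA : (!(kws.getD []).isEmpty) = true := by
        cases hke : (!(kws.getD []).isEmpty)
        · rw [h0 b, hke] at hb0; simp at hb0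
        · rfl
      have hAf : buttons.find? (fun btn =>
            pvKwHit (kws.getD []) btn && (!!ch.getD "" == "" || pvClassHit (ch.getD "") btn)) = some b := by
        rw [pv_find?_congr _ (fun x => R x == 0)]
        · exact hf0
        · intro x _; rw [h0 x, hkA]; simp
      rw [if_pos hkA, hAf]
      simp [Option.orElse]
    | none =>
      have hnot0 : ∀ x ∈ buttons, (R x == 0) = false := by
        intro x hx
        have := List.find?_eq_none.mp hf0 x hx
        simpa using this
      have hA1 : (if (!(kws.getD []).isEmpty) = true then
            buttons.find? (fun btn =>
              pvKwHit (kws.getD []) btn && (!!ch.getD "" == "" || pvClassHit (ch.getD "") btn))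
          else none) = none := by
        split_ifs with hg
        · rw [pv_find?_congr _ (fun x => R x == 0)]
          · exact hf0
          · intro x _; rw [h0 x, hg]; simp
        · rfl
      rw [hA1]
      cases hch : (!ch.getD "" == "") with
      | false =>
        have hf1 : buttons.find? (fun x => R x == 1) = none := by
          rw [List.find?_eq_none]
          intro x hx
          rw [h1 x, hch]
          simp
        simp [hch, hf1, Option.orElse]
      | true =>
        have hf1 : buttons.find? (fun x => R x == 1)
            = buttons.find? (fun btn => pvClassHit (ch.getD "") btn) := by
          apply pv_find?_congr
          intro x hx
          rw [h1 x, hnot0 x hx, hch]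
          simp
        rw [hf1]
        cases hq : buttons.find? (fun btn => pvClassHit (ch.getD "") btn) <;>
          simp [hch, Option.orElse]
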